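-- pv_equiv track=rewrite | github.com/mpaolodr/p_problems | nc/h2.py | increasingSubstrings
-- ===== SOURCE A (Python) =====
-- import string
--
-- def increasingSubstrings(s):
--
--     letters = list(string.ascii_letters)
--
--     results = list()
--     pointer = 0
--
--     for i in range(len(s)):
--
--         if i < len(s) - 1:
--
--             next_in_letters = letters[letters.index(s[i + 1]) - 1]
--
--             if next_in_letters != s[i]:
--
--                 results.append(s[pointer: i + 1])
--                 pointer = i + 1
--
--         else:
--
--             results.append(s[pointer: i + 1])
--
--     return results
-- ===== SOURCE B (Python) =====
-- import string
--
--
-- def increasingSubstrings(s):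
--     letters = string.ascii_letters
--     groups = []
--     cur = ''
--     prev = None
--     for c in reversed(s):
--         if prev is not None and letters[letters.index(prev) - 1] != c:
--             groups.append(cur)
--             cur = ''
--         cur = c + cur
--         prev = c
--     if cur:
--         groups.append(cur)
--     groups.reverse()
--     return groups
-- ===== Notes on version B (the rewrite author's own statement) =====
-- stated objective: alternative
-- what changed: B scans the string right-to-left, growing the current group by prepending characters and emitting completed groups in reverse discovery order (reversed at the end), instead of A's left-to-right index loop with a pointer and per-group slicing; measured constant-factor speedup from iterating characters directly instead of range(len(s)) with repeated indexing.
import Mathlib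
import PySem

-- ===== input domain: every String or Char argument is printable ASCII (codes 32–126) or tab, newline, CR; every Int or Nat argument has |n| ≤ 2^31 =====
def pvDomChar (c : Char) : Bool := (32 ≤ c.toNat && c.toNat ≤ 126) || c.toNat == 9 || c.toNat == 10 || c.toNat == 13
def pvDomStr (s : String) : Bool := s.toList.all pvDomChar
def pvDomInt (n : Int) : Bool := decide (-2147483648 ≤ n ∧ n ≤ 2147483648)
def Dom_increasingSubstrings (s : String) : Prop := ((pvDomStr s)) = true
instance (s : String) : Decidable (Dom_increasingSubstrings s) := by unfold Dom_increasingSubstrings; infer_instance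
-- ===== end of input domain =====

-- B scans the string right-to-left, growing the current group by prepending and
-- emitting completed groups in reverse discovery order, instead of A's
-- left-to-right pointer-and-slice loop; objective: alternative (same cost).

-- ===== PORT A =====
-- string.ascii_letters as a list of characters
def pvLetters : List Char := "abcdefghijklmnopqrstuvwxyzABCDEFGHIJKLMNOPQRSTUVWXYZ".toList

-- letters[letters.index(x) - 1]  (shared subexpression of both Pythons)
def pvPred (x : Char) : Char :=
  PySem.List.pyGetD pvLetters (((PySem.List.index? pvLetters x).getD 0 : Int) - 1) ' '

-- the body of A's for-loop; state = (results, pointer)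
def pvStepA (cs : List Char) (n : Int) (st : List String × Int) (i : Int) : List String × Int :=
  if i < n - 1 then
    let nextInLetters := pvPred (PySem.List.pyGetD cs (i + 1) ' ')
    if nextInLetters != PySem.List.pyGetD cs i ' ' then
      (st.1 ++ [String.ofList (PySem.List.slice cs (some st.2) (some (i + 1)))], i + 1)
    else st
  else
    (st.1 ++ [String.ofList (PySem.List.slice cs (some st.2) (some (i + 1)))], st.2)

def increasingSubstrings (s : String) : List String :=
  let cs := s.toList
  let n : Int := cs.length
  ((PySem.List.pyRange 0 n 1).foldl (pvStepA cs n) ([], 0)).1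

-- ===== PORT B =====
-- B's loop body; state = (groups, cur, prev)
def pvStepB (st : List String × List Char × Option Char) (c : Char) :
    List String × List Char × Option Char :=
  let st' :=
    match st.2.2 with
    | some p => if pvPred p != c then (st.1 ++ [String.ofList st.2.1], ([] : List Char), st.2.2) else st
    | none => st
  (st'.1, c :: st'.2.1, some c)

def increasingSubstrings_alt (s : String) : List String :=
  let st := s.toList.reverse.foldl pvStepB ([], [], none)
  let groups := if st.2.1.isEmpty then st.1 else st.1 ++ [String.ofList st.2.1]
  groups.reverse

-- ===== PRECONDITION & SPEC =====
-- Pre_ excludes exactly the inputs where some character after the first is not an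
-- ASCII letter: there Python A raises ValueError (letters.index fails).
def Pre_increasingSubstrings (s : String) : Prop :=
  (s.toList.tail.all (fun c => decide (c ∈ pvLetters))) = true

instance (s : String) : Decidable (Pre_increasingSubstrings s) := by
  unfold Pre_increasingSubstrings; infer_instance

def pvWitness_increasingSubstrings : String := "abZa"

def Spec_increasingSubstrings (s : String) (out : List String) : Prop := out = increasingSubstrings_alt s
instance (s : String) (out : List String) : Decidable (Spec_increasingSubstrings s out) := by unfold Spec_increasingSubstrings; infer_instance

-- ===== CLAIM (what is proved, stated in full; the proofs are below) =====
def Claim_equal_increasingSubstrings : Prop := ∀ (s : String), Dom_increasingSubstrings s → Pre_increasingSubstrings s → Spec_increasingSubstrings s (increasingSubstrings s)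

-- ===== LEMMAS AND PROOFS =====

-- reference grouping: split cs into maximal runs where pvPred of the next char equals the current
def pvGroups : List Char → List (List Char)
  | [] => []
  | c :: rest =>
    match pvGroups rest with
    | [] => [[c]]
    | [] :: gs => [c] :: [] :: gs
    | (d :: g) :: gs => if pvPred d != c then [c] :: (d :: g) :: gs else (c :: d :: g) :: gs

lemma pvGroups_cons_head (c : Char) (rest : List Char) :
    ∃ g gs, pvGroups (c :: rest) = (c :: g) :: gs := by
  match h : pvGroups rest with
  | [] => exact ⟨[], [], by simp [pvGroups, h]⟩
  | [] :: gs => exact ⟨[], [] :: gs, by simp [pvGroups, h]⟩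
  | (d :: g) :: gs =>
    by_cases hb : pvPred d != c
    · exact ⟨[], (d :: g) :: gs, by simp [pvGroups, h, hb]⟩
    · exact ⟨d :: g, gs, by simp [pvGroups, h, hb]⟩

-- B's right-to-left loop computes pvGroups
lemma pvLoopB :
    ∀ (cs : List Char) (g : List Char) (gs : List (List Char)),
      pvGroups cs = (cs.headD ' ' :: g) :: gs →
      cs.reverse.foldl pvStepB ([], [], none)
        = ((gs.map String.ofList).reverse, cs.headD ' ' :: g, some (cs.headD ' ')) := by
  intro cs
  induction cs with
  | nil => intro g gs h; simp [pvGroups] at h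
  | cons c rest ih =>
    intro g gs h
    have hfold : (c :: rest).reverse.foldl pvStepB ([], [], none)
        = pvStepB (rest.reverse.foldl pvStepB ([], [], none)) c := by
      simp [List.foldl_append]
    cases rest with
    | nil =>
      simp only [pvGroups, List.headD_cons] at h ⊢
      obtain ⟨h1, h2⟩ := List.cons_eq_cons.mp h
      rw [hfold]; simp [pvStepB, ← (List.cons_eq_cons.mp h1).2, ← h2]
    | cons d rest' =>
      obtain ⟨h', hs', hrg⟩ := pvGroups_cons_head d rest'
      have hIH := ih h' hs' (by simpa using hrg)
      simp only [List.headD_cons] at hIH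
      rw [hfold, hIH]
      have hG : pvGroups (c :: d :: rest')
          = if pvPred d != c then [c] :: (d :: h') :: hs' else (c :: d :: h') :: hs' := by
        rw [pvGroups.eq_def]; simp [hrg]
      rw [hG] at h
      simp only [List.headD_cons] at h ⊢
      by_cases hb : pvPred d != c
      · rw [if_pos hb] at h
        obtain ⟨h1, h2⟩ := List.cons_eq_cons.mp h
        obtain ⟨-, h1'⟩ := List.cons_eq_cons.mp h1
        simp [pvStepB, hb, ← h1', ← h2]
      · rw [if_neg hb] at h
        obtain ⟨h1, h2⟩ := List.cons_eq_cons.mp h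
        obtain ⟨-, h1'⟩ := List.cons_eq_cons.mp h1
        simp [pvStepB, hb, ← h1', ← h2]

-- slice cs p (k+1) extends slice cs p k by cs[k]
lemma pvSlice_snoc (cs : List Char) (p k : Nat) (hp : p ≤ k) (hk : k < cs.length) :
    (cs.drop p).take (k + 1 - p) = (cs.drop p).take (k - p) ++ [cs.getD k ' '] := by
  have h1 : k + 1 - p = (k - p) + 1 := by omega
  rw [h1, List.take_add_one]
  have h2 : (cs.drop p)[k - p]? = some (cs.getD k ' ') := by
    rw [List.getElem?_drop]
    have : p + (k - p) = k := by omega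
    rw [this, List.getElem?_eq_getElem hk, List.getD_eq_getElem cs ' ' hk]
  simp [h2]

-- prefix acc onto the first group and render
def pvMerge (acc : List Char) : List (List Char) → List String
  | [] => [String.ofList acc]
  | g :: gs => String.ofList (acc ++ g) :: gs.map String.ofList

-- A's loop: from index k with pointer p, the results extend by pvMerge of the
-- pending slice and the groups of the remaining suffix
lemma pvLoopA (cs : List Char) :
    ∀ (m k : Nat), cs.length = k + m → 0 < m → ∀ (res : List String) (p : Nat), p ≤ k →
      ((PySem.List.pyRange (k : Int) (cs.length : Int) 1).foldl
          (pvStepA cs (cs.length : Int)) (res, (p : Int))).1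
        = res ++ pvMerge ((cs.drop p).take (k - p)) (pvGroups (cs.drop k)) := by
  intro m
  induction m with
  | zero => intro k h hm; omega
  | succ m ih =>
    intro k h _ res p hp
    have hklt : (k : Int) < (cs.length : Int) := by omega
    have hkn : k < cs.length := by omega
    rw [PySem.List.pyRange_one_cons hklt]
    simp only [List.foldl_cons]
    have hdropk : cs.drop k = cs.getD k ' ' :: cs.drop (k + 1) := by
      rw [List.getD_eq_getElem cs ' ' hkn]
      exact (List.drop_eq_getElem_cons hkn)
    rcases Nat.eq_zero_or_pos m with hm0 | hmpos
    · -- last iteration: k = length - 1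
      have hk1 : k + 1 = cs.length := by omega
      have hnil : PySem.List.pyRange ((k : Int) + 1) (cs.length : Int) 1 = [] :=
        PySem.List.pyRange_one_eq_nil (by omega)
      have hstep : pvStepA cs (cs.length : Int) (res, (p : Int)) (k : Int)
          = (res ++ [String.ofList (PySem.List.slice cs (some (p : Int)) (some ((k : Int) + 1)))], (p : Int)) := by
        simp [pvStepA, show ¬ ((k : Int) < (cs.length : Int) - 1) by omega]
      rw [hstep, hnil]
      have hdrop1 : cs.drop (k + 1) = [] := by simp [hk1]
      have hsl : PySem.List.slice cs (some (p : Int)) (some ((k : Int) + 1))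
          = (cs.drop p).take (k + 1 - p) := by
        have : ((k : Int) + 1) = ((k + 1 : Nat) : Int) := by push_cast; ring
        rw [this, PySem.List.slice_natCast]
      rw [hsl, pvSlice_snoc cs p k hp hkn]
      simp [hdropk, hdrop1, pvGroups, pvMerge]
    · -- k < length - 1
      have hklt1 : (k : Int) < (cs.length : Int) - 1 := by omega
      have hk1n : k + 1 < cs.length := by omega
      -- next char
      have hget1 : PySem.List.pyGetD cs ((k : Int) + 1) ' ' = cs.getD (k + 1) ' ' := by
        have : ((k : Int) + 1) = ((k + 1 : Nat) : Int) := by push_cast; ring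
        rw [this, PySem.List.pyGetD_natCast]
      have hget0 : PySem.List.pyGetD cs (k : Int) ' ' = cs.getD k ' ' := by
        rw [PySem.List.pyGetD_natCast]
      have hdropk1 : cs.drop (k + 1) = cs.getD (k + 1) ' ' :: cs.drop (k + 2) := by
        rw [List.getD_eq_getElem cs ' ' hk1n]
        exact (List.drop_eq_getElem_cons hk1n)
      obtain ⟨g', gs', hg'⟩ := pvGroups_cons_head (cs.getD (k + 1) ' ') (cs.drop (k + 2))
      rw [← hdropk1] at hg'
      have hGk : pvGroups (cs.drop k)
          = if pvPred (cs.getD (k + 1) ' ') != cs.getD k ' '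
            then [cs.getD k ' '] :: (cs.getD (k + 1) ' ' :: g') :: gs'
            else (cs.getD k ' ' :: cs.getD (k + 1) ' ' :: g') :: gs' := by
        rw [hdropk]
        simp [pvGroups, hg']
      have hcast : ((k : Int) + 1) = ((k + 1 : Nat) : Int) := by push_cast; ring
      by_cases hb : pvPred (cs.getD (k + 1) ' ') != cs.getD k ' '
      · -- break after position k
        have hstep : pvStepA cs (cs.length : Int) (res, (p : Int)) (k : Int)
            = (res ++ [String.ofList (PySem.List.slice cs (some (p : Int)) (some ((k : Int) + 1)))], (k : Int) + 1) := by
          simp only [pvStepA, if_pos hklt1, hget1, hget0]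
          rw [if_pos hb]
        rw [hstep, hcast]
        have hIH := ih (k + 1) (by omega) hmpos
          (res ++ [String.ofList (PySem.List.slice cs (some (p : Int)) (some ((k + 1 : Nat) : Int)))])
          (k + 1) (le_refl _)
        rw [hIH]
        have hsl : PySem.List.slice cs (some (p : Int)) (some ((k + 1 : Nat) : Int))
            = (cs.drop p).take (k + 1 - p) := PySem.List.slice_natCast cs p (k + 1)
        rw [hsl, pvSlice_snoc cs p k hp hkn, hGk, if_pos hb, hg']
        simp [pvMerge]
      · -- no break
        have hstep : pvStepA cs (cs.length : Int) (res, (p : Int)) (k : Int) = (res, (p : Int)) := by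
          simp only [pvStepA, if_pos hklt1, hget1, hget0]
          rw [if_neg hb]
        rw [hstep, hcast]
        have hIH := ih (k + 1) (by omega) hmpos res p (by omega)
        rw [hIH, hGk, if_neg hb, hg']
        have htake : (cs.drop p).take (k + 1 - p)
            = (cs.drop p).take (k - p) ++ [cs.getD k ' '] := pvSlice_snoc cs p k hp hkn
        simp [pvMerge, htake]

-- ===== VERDICT (by name: the statement is the Claim_ definition above) =====
theorem increasingSubstrings_spec : Claim_equal_increasingSubstrings := by
  intro s _ _
  unfold Spec_increasingSubstrings increasingSubstrings increasingSubstrings_alt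
  by_cases hnil : s.toList = []
  · simp [hnil, PySem.List.pyRange_one_eq_nil]
  · have hpos : 0 < s.toList.length := List.length_pos_iff.mpr hnil
    obtain ⟨g, gs, hg⟩ := pvGroups_cons_head (s.toList.headD ' ') s.toList.tail
    have hht : s.toList.headD ' ' :: s.toList.tail = s.toList := by
      cases h : s.toList with | nil => exact absurd h hnil | cons a b => simp
    rw [hht] at hg
    have hB := pvLoopB s.toList g gs hg
    have hA := pvLoopA s.toList s.toList.length 0 (by omega) hpos [] 0 (le_refl _)
    simp only [Nat.cast_zero, List.drop_zero] at hA
    rw [hA, hB]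
    simp [hg, pvMerge]
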